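-- pv_equiv track=rewrite | github.com/dasguptaanika/HackNYU2019 | IBM_key_words.py | get_word_vals
-- ===== SOURCE A (Python) =====
-- def get_word_vals(text):
--     start = False
--     val_text = ""
--     for i in range(len(text), 0, -1):
--         if(text[i - 1] == "\""):
--             if(start == False):
--                 start = True
--             else:
--                 return val_text
--         else:
--             if(start):
--                 val_text = text[i - 1] + val_text
-- ===== SOURCE B (Python) =====
-- def get_word_vals(text):
--     last = text.rfind('"')
--     if last == -1:
--         return None
--     prev = text.rfind('"', 0, last)
--     if prev == -1:
--         return None
--     return text[prev + 1:last]
-- ===== Notes on version B (the rewrite author's own statement) =====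
-- stated objective: faster
-- what changed: B locates the last two quote positions with str.rfind and returns one slice between them, instead of A's backward character-by-character Python loop with a state flag and per-character string prepending.
import Mathlib
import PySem

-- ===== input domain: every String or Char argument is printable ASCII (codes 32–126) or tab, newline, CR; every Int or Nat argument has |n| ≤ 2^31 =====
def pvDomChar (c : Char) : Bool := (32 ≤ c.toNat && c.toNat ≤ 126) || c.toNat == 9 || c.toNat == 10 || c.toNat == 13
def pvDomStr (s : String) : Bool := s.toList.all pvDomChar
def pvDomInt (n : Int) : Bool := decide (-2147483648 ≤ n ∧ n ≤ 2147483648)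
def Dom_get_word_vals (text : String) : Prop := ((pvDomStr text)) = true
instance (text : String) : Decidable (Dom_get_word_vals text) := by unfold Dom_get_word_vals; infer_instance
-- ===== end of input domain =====

-- B replaces A's backward char-by-char scan by two rfind searches and one slice (objective: simpler).


-- ===== PORT A =====
-- the loop 'for i in range(len(text), 0, -1)' with early return, as downward recursion on i;
-- text[i-1] is always in range (1 ≤ i ≤ len), so getD's default is never used.
def goA (cs : List Char) : Nat → Bool → List Char → Option String
  | 0, _, _ => none                                   -- loop ends, implicit 'return None'
  | i + 1, start, val =>
    if cs.getD i ' ' = '"' then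
      if start = false then goA cs i true val
      else some (String.mk val)
    else
      if start then goA cs i start (cs.getD i ' ' :: val)
      else goA cs i start val

def get_word_vals (text : String) : Option String :=
  goA text.toList text.toList.length false []

-- ===== PORT B =====
-- hand port of text.rfind('"', 0, stop): greatest j < stop with text[j] == '"', none if absent
-- (exact: indices scanned are in range, so getD's default is never used for stop ≤ len).
def rlastQuote (cs : List Char) : Nat → Option Nat
  | 0 => none
  | j + 1 => if cs.getD j ' ' = '"' then some j else rlastQuote cs j

def get_word_vals_alt (text : String) : Option String :=
  let cs := text.toList
  match rlastQuote cs cs.length with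
  | none => none
  | some last =>
    match rlastQuote cs last with
    | none => none
    | some prev => some (String.mk (PySem.List.slice cs (some ((prev : Int) + 1)) (some (last : Int))))

-- ===== PRECONDITION & SPEC =====
def Spec_get_word_vals (text : String) (out : Option String) : Prop := out = get_word_vals_alt text
instance (text : String) (out : Option String) : Decidable (Spec_get_word_vals text out) := by unfold Spec_get_word_vals; infer_instance

-- ===== CLAIM (what is proved, stated in full; the proofs are below) =====
def Claim_equal_get_word_vals : Prop := ∀ (text : String), Dom_get_word_vals text → Spec_get_word_vals text (get_word_vals text)

-- ===== LEMMAS AND PROOFS =====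
theorem rlastQuote_lt {cs : List Char} {i p : Nat} (h : rlastQuote cs i = some p) : p < i := by
  induction i with
  | zero => simp [rlastQuote] at h
  | succ j ih =>
    simp only [rlastQuote] at h
    split at h
    · simp only [Option.some.injEq] at h
      omega
    · exact Nat.lt_succ_of_lt (ih h)

theorem goA_true (cs : List Char) (i : Nat) (h : i ≤ cs.length) (val : List Char) :
    goA cs i true val =
      match rlastQuote cs i with
      | none => none
      | some prev => some (String.mk ((cs.take i).drop (prev + 1) ++ val)) := by
  induction i generalizing val with
  | zero => simp [goA, rlastQuote]
  | succ j ih =>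
    simp only [goA, rlastQuote]
    by_cases hq : cs.getD j ' ' = '"'
    · simp only [hq, if_pos rfl]
      have : (cs.take (j + 1)).drop (j + 1) = [] :=
        List.drop_eq_nil_of_le (by simpa using Nat.min_le_left _ _)
      simp [this]
    · simp only [if_neg hq]
      rw [ih (by omega)]
      cases hp : rlastQuote cs j with
      | none => rfl
      | some prev =>
        have hpj : prev < j := rlastQuote_lt hp
        have hjlen : j < cs.length := by omega
        have hgd : cs.getD j ' ' = cs[j] := by
          simp [List.getD_eq_getElem?_getD, List.getElem?_eq_getElem hjlen]
        have htake : cs.take (j + 1) = cs.take j ++ [cs[j]] := by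
          rw [List.take_succ, List.getElem?_eq_getElem hjlen]; rfl
        simp only [htake, hgd]
        rw [List.drop_append_of_le_length (by simp; omega)]
        simp

theorem goA_false (cs : List Char) (i : Nat) (val : List Char) :
    goA cs i false val =
      match rlastQuote cs i with
      | none => none
      | some last => goA cs last true val := by
  induction i with
  | zero => simp [goA, rlastQuote]
  | succ j ih =>
    simp only [goA, rlastQuote]
    by_cases hq : cs.getD j ' ' = '"'
    · rw [if_pos hq, if_pos hq]
      simp
    · rw [if_neg hq, if_neg hq]
      simpa using ih

theorem get_word_vals_key (cs : List Char) :
    goA cs cs.length false [] =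
      match rlastQuote cs cs.length with
      | none => none
      | some last =>
        match rlastQuote cs last with
        | none => none
        | some prev =>
          some (String.mk (PySem.List.slice cs (some ((prev : Int) + 1)) (some (last : Int)))) := by
  rw [goA_false]
  cases hl : rlastQuote cs cs.length with
  | none => rfl
  | some last =>
    have hlast : last < cs.length := rlastQuote_lt hl
    show goA cs last true [] =
      match rlastQuote cs last with
      | none => none
      | some prev =>
        some (String.mk (PySem.List.slice cs (some ((prev : Int) + 1)) (some (last : Int))))
    rw [goA_true cs last (Nat.le_of_lt hlast)]
    cases hp : rlastQuote cs last with
    | none => rfl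
    | some prev =>
      show some (String.mk ((cs.take last).drop (prev + 1) ++ [])) =
        some (String.mk (PySem.List.slice cs (some ((prev : Int) + 1)) (some (last : Int))))
      have hcast : ((prev : Int) + 1) = ((prev + 1 : Nat) : Int) := by push_cast; ring
      rw [hcast, PySem.List.slice_natCast, List.append_nil]
      congr 2
      rw [List.drop_take]

-- ===== VERDICT (by name: the statement is the Claim_ definition above) =====
theorem get_word_vals_spec : Claim_equal_get_word_vals := by
  intro text _
  show goA text.toList text.toList.length false [] = get_word_vals_alt text
  rw [get_word_vals_key]
  rfl
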